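-- pv_equiv track=rewrite | github.com/sweetandsourkiss/ps | 프로그래머스/0/340202. ［PCCE 기출문제］ 6번 ／ 물 부족/［PCCE 기출문제］ 6번 ／ 물 부족.py | solution
-- ===== SOURCE A (Python) =====
-- def solution(storage, usage, change):
--     total_usage = 0
--     for i in range(len(change)):
--         usage = usage * change[i] // 100 + usage
--         total_usage += usage
--         if total_usage > storage:
--             return i
--
--     return -1
-- ===== SOURCE B (Python) =====
-- def solution(storage, usage, change):
--     # Build the per-step usage table, then cumulative totals, then scan for the first overflow.
--     usages = []
--     u = usage
--     for c in change:
--         u = u * c // 100 + u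
--         usages.append(u)
--     totals = []
--     t = 0
--     for v in usages:
--         t += v
--         totals.append(t)
--     for i, t in enumerate(totals):
--         if t > storage:
--             return i
--     return -1
-- ===== Notes on version B (the rewrite author's own statement) =====
-- stated objective: alternative
-- what changed: Replaces the fused early-exit loop with a table-building decomposition: first build the per-step usage list, then the cumulative totals, then locate the first index whose total exceeds storage.
import Mathlib
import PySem

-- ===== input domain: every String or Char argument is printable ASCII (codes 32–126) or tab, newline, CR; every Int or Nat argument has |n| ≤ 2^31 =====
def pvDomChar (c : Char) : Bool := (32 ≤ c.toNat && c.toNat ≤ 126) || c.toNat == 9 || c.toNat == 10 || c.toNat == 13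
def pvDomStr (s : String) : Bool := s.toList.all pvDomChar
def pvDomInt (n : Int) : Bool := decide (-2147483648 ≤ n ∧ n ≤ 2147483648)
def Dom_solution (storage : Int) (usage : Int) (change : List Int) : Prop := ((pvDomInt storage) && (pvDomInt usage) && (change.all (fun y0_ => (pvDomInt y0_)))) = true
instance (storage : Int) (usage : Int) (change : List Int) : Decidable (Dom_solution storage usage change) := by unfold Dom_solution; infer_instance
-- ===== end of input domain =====

-- B replaces A's fused early-exit loop by a table-building decomposition (usage list,
-- then cumulative totals, then a scan for the first index exceeding storage); objective: alternative.
-- ===== PORT A =====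
def solGoA (storage : Int) (usage : Int) (total : Int) (i : Int) : List Int → Int
  | [] => -1
  | c :: cs =>
    let u := PySem.Int.floordiv (usage * c) 100 + usage
    let t := total + u
    if t > storage then i else solGoA storage u t (i + 1) cs

def solution (storage : Int) (usage : Int) (change : List Int) : Int :=
  solGoA storage usage 0 0 change

-- ===== PORT B =====
def usagesB (u : Int) : List Int → List Int
  | [] => []
  | c :: cs =>
    let u' := PySem.Int.floordiv (u * c) 100 + u
    u' :: usagesB u' cs

def totalsB (t : Int) : List Int → List Int
  | [] => []
  | v :: vs => (t + v) :: totalsB (t + v) vs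

def findIdxB (storage : Int) (i : Int) : List Int → Int
  | [] => -1
  | t :: ts => if t > storage then i else findIdxB storage (i + 1) ts

def solution_alt (storage : Int) (usage : Int) (change : List Int) : Int :=
  findIdxB storage 0 (totalsB 0 (usagesB usage change))

-- ===== PRECONDITION & SPEC =====
def Spec_solution (storage : Int) (usage : Int) (change : List Int) (out : Int) : Prop := out = solution_alt storage usage change
instance (storage : Int) (usage : Int) (change : List Int) (out : Int) : Decidable (Spec_solution storage usage change out) := by unfold Spec_solution; infer_instance

-- ===== CLAIM (what is proved, stated in full; the proofs are below) =====
def Claim_equal_solution : Prop := ∀ (storage : Int) (usage : Int) (change : List Int), Dom_solution storage usage change → Spec_solution storage usage change (solution storage usage change)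

-- ===== LEMMAS AND PROOFS =====

-- ===== VERDICT (by name: the statement is the Claim_ definition above) =====
theorem go_eq (storage : Int) (change : List Int) :
    ∀ (usage total i : Int),
      solGoA storage usage total i change = findIdxB storage i (totalsB total (usagesB usage change)) := by
  induction change with
  | nil => intro u t i; rfl
  | cons c cs ih =>
    intro u t i
    simp only [solGoA, usagesB, totalsB, findIdxB]
    split
    · rfl
    · exact ih _ _ _

theorem solution_spec : Claim_equal_solution := by
  intro storage usage change _
  unfold Spec_solution solution solution_alt
  exact go_eq storage change usage 0 0
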